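-- pv_equiv track=rewrite | github.com/reirocco/CyberchallengeTool | tools/src/cryptography/fancy/fancy_cipher.py | my_fancy_cipher
-- ===== SOURCE A (Python) =====
-- import copy
--
-- def my_fancy_cipher(m,k):
--
--     c = copy.copy(m)
--
--     #Encryption process
--     for i in range(7):
--         for j in range(0,len(k)):
--
--             if k[j]==1:
--                 pos_0 = ((i+j)+2)%16
--                 pos_1 = (j+i)%16
--                 tmp = c[pos_0]
--                 c[pos_0] = (c[j]+k[pos_1%len(k)])%2
--                 c[pos_1] = (tmp+k[pos_0%len(k)])%2
--
--
--     return c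
-- ===== SOURCE B (Python) =====
-- import copy
--
-- def _bit(sym, a):
--     tag, t, p = sym
--     if tag == "raw":
--         return ("bit", t, a % 2)
--     return ("bit", t, (p + a) % 2)
--
-- def my_fancy_cipher(m, k):
--     n = len(k)
--     # round schedule: the operations the key selects, positions only
--     sched = [(j, (i + j + 2) % 16, (i + j) % 16)
--              for i in range(7) for j in range(n) if k[j] == 1]
--     # partially evaluate the rounds: each cell becomes a formula over one input cell
--     sym = [("raw", t, 0) for t in range(len(m))]
--     for j, p0, p1 in sched:
--         tmp = sym[p0]
--         sym[p0] = _bit(sym[j], k[p1 % n])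
--         sym[p1] = _bit(tmp, k[p0 % n])
--     # evaluate the formulas against m in one pass
--     return [m[t] if tag == "raw" else (m[t] + p) % 2 for tag, t, p in sym]
-- ===== Notes on version B (the rewrite author's own statement) =====
-- stated objective: alternative
-- what changed: B precomputes the key-selected round schedule, partially evaluates the rounds into per-cell symbolic formulas (input index + parity) without touching m, then evaluates all formulas against m in a single final pass, instead of A's in-place mutation of the message through the nested round loops.
import Mathlib
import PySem

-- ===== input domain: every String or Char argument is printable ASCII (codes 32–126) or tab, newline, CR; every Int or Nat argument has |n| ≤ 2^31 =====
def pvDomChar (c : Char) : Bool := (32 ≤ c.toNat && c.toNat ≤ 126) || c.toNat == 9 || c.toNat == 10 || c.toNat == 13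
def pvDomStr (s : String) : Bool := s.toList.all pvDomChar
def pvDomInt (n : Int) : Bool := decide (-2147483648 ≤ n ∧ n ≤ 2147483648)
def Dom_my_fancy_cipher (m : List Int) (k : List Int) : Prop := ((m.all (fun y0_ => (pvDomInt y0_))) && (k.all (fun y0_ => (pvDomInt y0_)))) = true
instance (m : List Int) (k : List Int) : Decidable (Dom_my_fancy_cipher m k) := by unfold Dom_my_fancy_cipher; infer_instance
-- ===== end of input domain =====

-- B partially evaluates the key-dependent rounds into per-cell symbolic formulas from a
-- precomputed schedule and applies them to m in one final pass (alternative decomposition;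
-- return-value equivalence, A does not mutate its arguments).

-- ===== PORT A =====
-- literal transliteration of A's nested loops mutating c in place
def pvStepA (k : List Int) (i : Nat) (c : List Int) (j : Nat) : List Int :=
  if k.getD j 0 = 1 then
    let p0 := (i + j + 2) % 16
    let p1 := (j + i) % 16
    let tmp := c.getD p0 0
    let c1 := c.set p0 ((c.getD j 0 + k.getD (p1 % k.length) 0) % 2)
    c1.set p1 ((tmp + k.getD (p0 % k.length) 0) % 2)
  else c

def my_fancy_cipher (m : List Int) (k : List Int) : List Int :=
  (List.range 7).foldl (fun c i => (List.range k.length).foldl (pvStepA k i) c) m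

-- ===== PORT B =====
-- a cell formula: `raw t` means m[t]; `bit t p` means (m[t]+p)%2
inductive PvSym where
  | raw : Nat → PvSym
  | bit : Nat → Int → PvSym
deriving DecidableEq, Repr

-- (e + a) % 2, symbolically
def pvBit : PvSym → Int → PvSym
  | .raw t, a => .bit t (a % 2)
  | .bit t p, a => .bit t ((p + a) % 2)

-- the key-selected round schedule (positions only)
def pvSched (k : List Int) : List (Nat × Nat × Nat) :=
  (List.range 7).flatMap (fun i =>
    ((List.range k.length).filter (fun j => k.getD j 0 = 1)).map
      (fun j => (j, (i + j + 2) % 16, (i + j) % 16)))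

-- one scheduled operation on the symbolic state
def pvStepB (k : List Int) (s : List PvSym) (op : Nat × Nat × Nat) : List PvSym :=
  let (j, p0, p1) := op
  let tmp := s.getD p0 (.raw 0)
  let s1 := s.set p0 (pvBit (s.getD j (.raw 0)) (k.getD (p1 % k.length) 0))
  s1.set p1 (pvBit tmp (k.getD (p0 % k.length) 0))

def pvEval (m : List Int) : PvSym → Int
  | .raw t => m.getD t 0
  | .bit t p => (m.getD t 0 + p) % 2

def my_fancy_cipher_alt (m : List Int) (k : List Int) : List Int :=
  (((pvSched k).foldl (pvStepB k) ((List.range m.length).map PvSym.raw)).map (pvEval m))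

-- ===== PRECONDITION & SPEC =====
-- Exactly the inputs on which Python A returns normally: every key-selected operation's
-- three touched positions lie inside m (otherwise A raises IndexError).
def Pre_my_fancy_cipher (m : List Int) (k : List Int) : Prop :=
  ∀ i < 7, ∀ j < k.length, k.getD j 0 = 1 →
    ((i + j + 2) % 16 < m.length ∧ (i + j) % 16 < m.length ∧ j < m.length)
instance (m : List Int) (k : List Int) : Decidable (Pre_my_fancy_cipher m k) := by
  unfold Pre_my_fancy_cipher; infer_instance

def pvWitness_my_fancy_cipher : List Int × List Int :=
  ([0,1,0,1,0,1,0,1,0,1,0,1,0,1,0,1], [1, 0])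

def Spec_my_fancy_cipher (m : List Int) (k : List Int) (out : List Int) : Prop := out = my_fancy_cipher_alt m k
instance (m : List Int) (k : List Int) (out : List Int) : Decidable (Spec_my_fancy_cipher m k out) := by unfold Spec_my_fancy_cipher; infer_instance

-- ===== CLAIM (what is proved, stated in full; the proofs are below) =====
def Claim_equal_my_fancy_cipher : Prop := ∀ (m : List Int) (k : List Int), Dom_my_fancy_cipher m k → Pre_my_fancy_cipher m k → Spec_my_fancy_cipher m k (my_fancy_cipher m k)

-- ===== LEMMAS AND PROOFS =====

-- the concrete effect of one scheduled operation (proof-only bridge)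
def pvStepC (k : List Int) (c : List Int) (op : Nat × Nat × Nat) : List Int :=
  let (j, p0, p1) := op
  let tmp := c.getD p0 0
  let c1 := c.set p0 ((c.getD j 0 + k.getD (p1 % k.length) 0) % 2)
  c1.set p1 ((tmp + k.getD (p0 % k.length) 0) % 2)

theorem pv_inner (k : List Int) (i : Nat) (l : List Nat) (c : List Int) :
    l.foldl (pvStepA k i) c =
      ((l.filter (fun j => k.getD j 0 = 1)).map
        (fun j => (j, (i + j + 2) % 16, (i + j) % 16))).foldl (pvStepC k) c := by
  induction l generalizing c with
  | nil => rfl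
  | cons j t ih =>
    by_cases h : k.getD j 0 = 1
    · have h' : k[j]?.getD 0 = 1 := by simpa [List.getD] using h
      simp only [List.foldl_cons, List.filter_cons, h, decide_true, if_true, List.map_cons]
      rw [ih]
      congr 1
      simp [pvStepA, pvStepC, h', Nat.add_comm j i]
    · have h' : ¬ k[j]?.getD 0 = 1 := by simpa [List.getD] using h
      simp only [List.foldl_cons, List.filter_cons, h, decide_false]
      rw [ih]
      congr 1
      simp [pvStepA, h']

theorem pv_A_as_sched (m k : List Int) :
    my_fancy_cipher m k = (pvSched k).foldl (pvStepC k) m := by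
  unfold my_fancy_cipher pvSched
  rw [List.foldl_flatMap]
  suffices h : ∀ (l : List Nat) (c : List Int),
      l.foldl (fun c i => (List.range k.length).foldl (pvStepA k i) c) c =
      l.foldl (fun acc i =>
        (((List.range k.length).filter (fun j => k.getD j 0 = 1)).map
          (fun j => (j, (i + j + 2) % 16, (i + j) % 16))).foldl (pvStepC k) acc) c from
    h (List.range 7) m
  intro l
  induction l with
  | nil => intro c; rfl
  | cons x t ih =>
    intro c
    rw [List.foldl_cons, List.foldl_cons, pv_inner, ih]

theorem pv_bit_eval (m : List Int) (e : PvSym) (a : Int) :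
    pvEval m (pvBit e a) = (pvEval m e + a) % 2 := by
  cases e with
  | raw t => simp only [pvBit, pvEval]; omega
  | bit t p => simp only [pvBit, pvEval]; omega

theorem pv_stepB_map (m k : List Int) (s : List PvSym) (op : Nat × Nat × Nat)
    (hj : op.1 < s.length) (h0 : op.2.1 < s.length) (h1 : op.2.2 < s.length) :
    (pvStepB k s op).map (pvEval m) = pvStepC k (s.map (pvEval m)) op := by
  obtain ⟨j, p0, p1⟩ := op
  simp only at hj h0 h1
  have hmap : ∀ (i : Nat), i < s.length →
      (s.map (pvEval m)).getD i 0 = pvEval m (s.getD i (.raw 0)) := by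
    intro i hi
    rw [List.getD_eq_getElem _ _ (by simpa), List.getD_eq_getElem _ _ hi, List.getElem_map]
  simp only [pvStepB, pvStepC, List.map_set, pv_bit_eval, hmap _ hj, hmap _ h0]

theorem pv_fold_map (m k : List Int) (ops : List (Nat × Nat × Nat)) (s : List PvSym)
    (h : ∀ op ∈ ops, op.1 < s.length ∧ op.2.1 < s.length ∧ op.2.2 < s.length) :
    ((ops.foldl (pvStepB k) s).map (pvEval m)) = ops.foldl (pvStepC k) (s.map (pvEval m)) := by
  induction ops generalizing s with
  | nil => rfl
  | cons op t ih =>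
    obtain ⟨h1, h2⟩ := List.forall_mem_cons.mp h
    have hlen : (pvStepB k s op).length = s.length := by
      simp [pvStepB]
    simp only [List.foldl_cons]
    rw [ih _ (fun o ho => by rw [hlen]; exact h2 o ho),
        pv_stepB_map m k s op h1.1 h1.2.1 h1.2.2]

theorem pv_init_eval (m : List Int) :
    ((List.range m.length).map PvSym.raw).map (pvEval m) = m := by
  apply List.ext_getElem
  · simp
  · intro i h1 h2
    simp [pvEval, List.getElem?_eq_getElem h2]

-- ===== VERDICT (by name: the statement is the Claim_ definition above) =====
theorem my_fancy_cipher_spec : Claim_equal_my_fancy_cipher := by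
  intro m k _ hpre
  unfold Spec_my_fancy_cipher my_fancy_cipher_alt
  rw [pv_A_as_sched]
  rw [pv_fold_map m k _ _ ?hb, pv_init_eval]
  intro op hop
  simp only [pvSched, List.mem_flatMap, List.mem_map, List.mem_filter, List.mem_range] at hop
  obtain ⟨i, hi, j, ⟨hj, hk1⟩, rfl⟩ := hop
  simp only [List.length_map, List.length_range]
  exact ⟨(hpre i hi j hj (by simpa using hk1)).2.2,
         (hpre i hi j hj (by simpa using hk1)).1,
         (hpre i hi j hj (by simpa using hk1)).2.1⟩
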